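-- pv_equiv track=rewrite | github.com/PROrock/advent-of-code-solutions | 2023/14_parabolic_reflector_dish/2.py | tilt_to_west
-- ===== SOURCE A (Python) =====
-- ROCK = "O"
--
-- WALL = "#"
--
-- EMPTY = "."
--
-- def tilt_to_west(grid):
--     new_grid = []
--     for line in grid:
--         new_segments = []
--         segments = line.split(WALL)
--         for segment in segments:
--             n_rocks = segment.count(ROCK)
--             new_segments.append(n_rocks*ROCK + (len(segment)-n_rocks)*EMPTY)
--         new_line = WALL.join(new_segments)
--         new_grid.append(new_line)
--     return tuple(new_grid)
-- ===== SOURCE B (Python) =====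
-- ROCK = "O"
-- WALL = "#"
-- EMPTY = "."
--
-- def tilt_to_west(grid):
--     out = []
--     for line in grid:
--         parts = []
--         rocks = 0
--         dots = 0
--         for ch in line:
--             if ch == WALL:
--                 parts.append(rocks * ROCK + dots * EMPTY + WALL)
--                 rocks = 0
--                 dots = 0
--             elif ch == ROCK:
--                 rocks += 1
--             else:
--                 dots += 1
--         parts.append(rocks * ROCK + dots * EMPTY)
--         out.append("".join(parts))
--     return tuple(out)
-- ===== Notes on version B (the rewrite author's own statement) =====
-- stated objective: alternative
-- what changed: Replaces split('#')/count/join per row with a single left-to-right scan keeping rock/dot counters per segment, emitting each segment when a wall is reached.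
import Mathlib
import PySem

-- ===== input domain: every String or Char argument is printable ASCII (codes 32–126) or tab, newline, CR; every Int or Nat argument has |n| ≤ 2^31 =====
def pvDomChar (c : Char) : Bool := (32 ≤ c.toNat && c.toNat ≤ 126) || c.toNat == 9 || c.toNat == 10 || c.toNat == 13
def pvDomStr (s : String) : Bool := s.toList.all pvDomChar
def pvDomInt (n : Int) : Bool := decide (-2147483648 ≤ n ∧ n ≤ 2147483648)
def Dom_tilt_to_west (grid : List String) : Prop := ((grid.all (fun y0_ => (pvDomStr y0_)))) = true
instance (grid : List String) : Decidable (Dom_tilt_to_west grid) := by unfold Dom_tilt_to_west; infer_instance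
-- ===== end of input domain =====

-- B replaces A's per-row split('#')/count/join with a single counter scan per row (alternative decomposition, same cost).


-- ===== PORT A =====
def tilt_to_west (grid : List String) : List String :=
  grid.foldl (fun new_grid line =>
    let segments := PySem.Chars.splitOn line.toList ['#']
    let new_segments := segments.foldl (fun ns segment =>
      let n_rocks : Nat := PySem.Chars.count segment ['O']
      ns ++ [PySem.List.pyRepeat ['O'] (n_rocks : Int) ++
             PySem.List.pyRepeat ['.'] ((segment.length : Int) - (n_rocks : Int))]) []
    new_grid ++ [String.ofList (PySem.Chars.join ['#'] new_segments)]) []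

-- ===== PORT B =====
def tilt_to_west_alt (grid : List String) : List String :=
  grid.foldl (fun out line =>
    let st := line.toList.foldl (fun (st : List (List Char) × Nat × Nat) ch =>
      if ch = '#' then (st.1 ++ [List.replicate st.2.1 'O' ++ List.replicate st.2.2 '.' ++ ['#']], 0, 0)
      else if ch = 'O' then (st.1, st.2.1 + 1, st.2.2)
      else (st.1, st.2.1, st.2.2 + 1)) ([], 0, 0)
    out ++ [String.ofList ((st.1 ++ [List.replicate st.2.1 'O' ++ List.replicate st.2.2 '.']).flatten)]) []

-- ===== PRECONDITION & SPEC =====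
def Spec_tilt_to_west (grid : List String) (out : List String) : Prop := out = tilt_to_west_alt grid
instance (grid : List String) (out : List String) : Decidable (Spec_tilt_to_west grid out) := by unfold Spec_tilt_to_west; infer_instance

-- ===== CLAIM (what is proved, stated in full; the proofs are below) =====
def Claim_equal_tilt_to_west : Prop := ∀ (grid : List String), Dom_tilt_to_west grid → Spec_tilt_to_west grid (tilt_to_west grid)

-- ===== LEMMAS AND PROOFS =====

-- split on a single separator char, as a structural recursion (used only in proofs)
def split1 (c : Char) : List Char → List (List Char)
  | [] => [[]]
  | x :: xs =>
    match split1 c xs with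
    | [] => [[]]
    | h :: t => if x = c then [] :: h :: t else (x :: h) :: t

lemma split1_ne_nil (c : Char) (cs : List Char) : split1 c cs ≠ [] := by
  cases cs with
  | nil => simp [split1]
  | cons x xs =>
    simp only [split1]
    rcases h : split1 c xs with _ | ⟨h', t'⟩ <;> split_ifs <;> simp

-- what A writes for one '#'-free segment
def emitSeg (seg : List Char) : List Char :=
  List.replicate (seg.count 'O') 'O' ++ List.replicate (seg.length - seg.count 'O') '.'

-- the non-first segments, each preceded by its wall
def tailPart (t : List (List Char)) : List Char :=
  (t.map (fun seg => '#' :: emitSeg seg)).flatten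

-- PySem.Chars.count with a single-char needle is List.count
lemma count_go_step (c x : Char) (t : List Char) (acc fuel : Nat) :
    PySem.Chars.count.go [c] (fuel+1) (x :: t) acc =
      if x = c then PySem.Chars.count.go [c] fuel t (acc+1)
      else PySem.Chars.count.go [c] fuel t acc := by
  simp [PySem.Chars.count.go, List.isPrefixOf]
  split_ifs <;> simp_all

lemma count_go_single (c : Char) :
    ∀ (l : List Char) (fuel acc : Nat), l.length ≤ fuel →
      PySem.Chars.count.go [c] fuel l acc = acc + l.count c := by
  intro l
  induction l with
  | nil => intro fuel acc _; cases fuel <;> simp [PySem.Chars.count.go]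
  | cons x t ih =>
    intro fuel acc hf
    cases fuel with
    | zero => simp at hf
    | succ fuel =>
      rw [count_go_step]
      have hf' : t.length ≤ fuel := by simpa using hf
      split_ifs with hx
      · rw [ih fuel (acc+1) hf']; subst hx; simp; omega
      · rw [ih fuel acc hf']; simp [hx]

lemma count_single (c : Char) (cs : List Char) :
    PySem.Chars.count cs [c] = cs.count c := by
  simp [PySem.Chars.count, count_go_single c cs cs.length 0 le_rfl]

-- PySem.Chars.splitOn with a single-char separator is split1
def headCons (pre : List Char) : List (List Char) → List (List Char)
  | [] => [pre]
  | h :: t => (pre ++ h) :: t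

lemma splitOn_go_step (c x : Char) (rest cur : List Char) (acc : List (List Char)) (fuel : Nat) :
    PySem.Chars.splitOn.go [c] (fuel+1) (x :: rest) cur acc =
      if x = c then PySem.Chars.splitOn.go [c] fuel rest [] (cur.reverse :: acc)
      else PySem.Chars.splitOn.go [c] fuel rest (x :: cur) acc := by
  simp [PySem.Chars.splitOn.go, List.isPrefixOf]
  split_ifs <;> simp_all

lemma splitOn_go_single (c : Char) :
    ∀ (l : List Char) (fuel : Nat) (cur : List Char) (acc : List (List Char)), l.length < fuel →
      PySem.Chars.splitOn.go [c] fuel l cur acc =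
        acc.reverse ++ headCons cur.reverse (split1 c l) := by
  intro l
  induction l with
  | nil =>
    intro fuel cur acc hf
    cases fuel with
    | zero => simp at hf
    | succ fuel => simp [PySem.Chars.splitOn.go, split1, headCons]
  | cons x rest ih =>
    intro fuel cur acc hf
    cases fuel with
    | zero => simp at hf
    | succ fuel =>
      rw [splitOn_go_step]
      have hf' : rest.length < fuel := by simp at hf; omega
      rcases hs : split1 c rest with _ | ⟨h', t'⟩
      · exact absurd hs (split1_ne_nil c rest)
      · split_ifs with hx
        · rw [ih fuel [] (cur.reverse :: acc) hf']
          simp [split1, hs, hx, headCons]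
        · rw [ih fuel (x :: cur) acc hf']
          simp [split1, hs, hx, headCons]

lemma splitOn_single (c : Char) (cs : List Char) :
    PySem.Chars.splitOn cs [c] = split1 c cs := by
  rw [PySem.Chars.splitOn, splitOn_go_single c cs (cs.length + 1) [] [] (by omega)]
  rcases hs : split1 c cs with _ | ⟨h, t⟩
  · exact absurd hs (split1_ne_nil c cs)
  · simp [headCons]

-- the result of B's scan of one line, as a structural recursion
def sweep (r d : Nat) : List Char → List Char
  | [] => List.replicate r 'O' ++ List.replicate d '.'
  | ch :: cs =>
    if ch = '#' then List.replicate r 'O' ++ List.replicate d '.' ++ '#' :: sweep 0 0 cs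
    else if ch = 'O' then sweep (r+1) d cs
    else sweep r (d+1) cs

-- B's foldl loop (with the closing append of the last segment) computes sweep
lemma alt_loop :
    ∀ (cs : List Char) (parts : List (List Char)) (r d : Nat),
      ((cs.foldl (fun (st : List (List Char) × Nat × Nat) ch =>
        if ch = '#' then (st.1 ++ [List.replicate st.2.1 'O' ++ List.replicate st.2.2 '.' ++ ['#']], 0, 0)
        else if ch = 'O' then (st.1, st.2.1 + 1, st.2.2)
        else (st.1, st.2.1, st.2.2 + 1)) (parts, r, d)).1 ++
       [List.replicate (cs.foldl (fun (st : List (List Char) × Nat × Nat) ch =>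
        if ch = '#' then (st.1 ++ [List.replicate st.2.1 'O' ++ List.replicate st.2.2 '.' ++ ['#']], 0, 0)
        else if ch = 'O' then (st.1, st.2.1 + 1, st.2.2)
        else (st.1, st.2.1, st.2.2 + 1)) (parts, r, d)).2.1 'O' ++
        List.replicate (cs.foldl (fun (st : List (List Char) × Nat × Nat) ch =>
        if ch = '#' then (st.1 ++ [List.replicate st.2.1 'O' ++ List.replicate st.2.2 '.' ++ ['#']], 0, 0)
        else if ch = 'O' then (st.1, st.2.1 + 1, st.2.2)
        else (st.1, st.2.1, st.2.2 + 1)) (parts, r, d)).2.2 '.']).flatten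
      = parts.flatten ++ sweep r d cs := by
  intro cs
  induction cs with
  | nil => intro parts r d; simp [sweep]
  | cons ch cs ih =>
    intro parts r d
    simp only [List.foldl_cons]
    split_ifs with h1 h2
    · rw [ih (parts ++ [List.replicate r 'O' ++ List.replicate d '.' ++ ['#']]) 0 0]
      simp [sweep, h1]
    · rw [ih parts (r+1) d]
      simp [sweep, h2]
    · rw [ih parts r (d+1)]
      simp [sweep, h1, h2]

-- sweep, described through split1
lemma sweep_eq :
    ∀ (cs : List Char) (r d : Nat) (h : List Char) (t : List (List Char)),
      split1 '#' cs = h :: t →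
      sweep r d cs = List.replicate (r + h.count 'O') 'O' ++
        List.replicate (d + (h.length - h.count 'O')) '.' ++ tailPart t := by
  intro cs
  induction cs with
  | nil =>
    intro r d h t hs
    simp [split1] at hs
    obtain ⟨h1, h2⟩ := hs
    subst h1; subst h2
    simp [sweep, tailPart]
  | cons x cs ih =>
    intro r d h t hs
    rcases hsplit : split1 '#' cs with _ | ⟨h', t'⟩
    · exact absurd hsplit (split1_ne_nil '#' cs)
    · simp only [split1, hsplit] at hs
      by_cases hx : x = '#'
      · subst hx
        simp only [if_pos trivial] at hs
        obtain ⟨h1, h2⟩ := List.cons.inj hs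
        subst h1; subst h2
        rw [show sweep r d ('#' :: cs) = List.replicate r 'O' ++ List.replicate d '.' ++ '#' :: sweep 0 0 cs from by simp [sweep]]
        rw [ih 0 0 h' t' hsplit]
        simp [tailPart, emitSeg]
      · simp only [if_neg hx] at hs
        obtain ⟨h1, h2⟩ := List.cons.inj hs
        subst h2
        have hcle : h'.count 'O' ≤ h'.length := List.count_le_length
        by_cases hO : x = 'O'
        · subst hO
          subst h1
          rw [show sweep r d ('O' :: cs) = sweep (r+1) d cs from by simp [sweep, hx]]
          rw [ih (r+1) d h' t' hsplit]
          have e1 : r + ('O' :: h').count 'O' = r + 1 + h'.count 'O' := by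
            simp; omega
          have e2 : d + (('O' :: h').length - ('O' :: h').count 'O') = d + (h'.length - h'.count 'O') := by
            simp
          rw [e1, e2]
        · subst h1
          rw [show sweep r d (x :: cs) = sweep r (d+1) cs from by simp [sweep, hx, hO]]
          rw [ih r (d+1) h' t' hsplit]
          have e1 : r + (x :: h').count 'O' = r + h'.count 'O' := by
            simp [hO]
          have e2 : d + ((x :: h').length - (x :: h').count 'O') = d + 1 + (h'.length - h'.count 'O') := by
            simp [hO]; omega
          rw [e1, e2]

-- A's per-segment output is emitSeg
lemma emitA_eq (seg : List Char) :
    PySem.List.pyRepeat ['O'] ((PySem.Chars.count seg ['O'] : Nat) : Int) ++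
      PySem.List.pyRepeat ['.'] ((seg.length : Int) - ((PySem.Chars.count seg ['O'] : Nat) : Int))
    = emitSeg seg := by
  rw [count_single]
  have hle : seg.count 'O' ≤ seg.length := List.count_le_length
  rw [PySem.List.pyRepeat_singleton, PySem.List.pyRepeat_singleton]
  unfold emitSeg
  have e1 : (((seg.count 'O' : Nat) : Int)).toNat = seg.count 'O' := by omega
  have e2 : (((seg.length : Nat) : Int) - ((seg.count 'O' : Nat) : Int)).toNat
      = seg.length - seg.count 'O' := by omega
  rw [e1, e2]

-- join with '#' over the mapped segments
lemma join_emit :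
    ∀ (t : List (List Char)) (h : List Char),
      PySem.Chars.join ['#'] (h :: t.map emitSeg) = h ++ tailPart t := by
  intro t
  induction t with
  | nil => intro h; simp [PySem.Chars.join_singleton, tailPart]
  | cons h2 t ih =>
    intro h
    rw [List.map_cons, PySem.Chars.join_cons_cons, ih (emitSeg h2)]
    simp [tailPart]

-- the whole per-line equality
lemma line_eq (cs : List Char) :
    PySem.Chars.join ['#']
      ((PySem.Chars.splitOn cs ['#']).foldl (fun ns segment =>
        ns ++ [PySem.List.pyRepeat ['O'] ((PySem.Chars.count segment ['O'] : Nat) : Int) ++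
               PySem.List.pyRepeat ['.'] ((segment.length : Int) - ((PySem.Chars.count segment ['O'] : Nat) : Int))]) [])
    = ((cs.foldl (fun (st : List (List Char) × Nat × Nat) ch =>
        if ch = '#' then (st.1 ++ [List.replicate st.2.1 'O' ++ List.replicate st.2.2 '.' ++ ['#']], 0, 0)
        else if ch = 'O' then (st.1, st.2.1 + 1, st.2.2)
        else (st.1, st.2.1, st.2.2 + 1)) ([], 0, 0)).1 ++
       [List.replicate (cs.foldl (fun (st : List (List Char) × Nat × Nat) ch =>
        if ch = '#' then (st.1 ++ [List.replicate st.2.1 'O' ++ List.replicate st.2.2 '.' ++ ['#']], 0, 0)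
        else if ch = 'O' then (st.1, st.2.1 + 1, st.2.2)
        else (st.1, st.2.1, st.2.2 + 1)) ([], 0, 0)).2.1 'O' ++
        List.replicate (cs.foldl (fun (st : List (List Char) × Nat × Nat) ch =>
        if ch = '#' then (st.1 ++ [List.replicate st.2.1 'O' ++ List.replicate st.2.2 '.' ++ ['#']], 0, 0)
        else if ch = 'O' then (st.1, st.2.1 + 1, st.2.2)
        else (st.1, st.2.1, st.2.2 + 1)) ([], 0, 0)).2.2 '.']).flatten := by
  rw [alt_loop cs [] 0 0]
  rw [PySem.List.foldl_append_singleton_eq_map]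
  rw [splitOn_single]
  rcases hs : split1 '#' cs with _ | ⟨h, t⟩
  · exact absurd hs (split1_ne_nil '#' cs)
  · rw [List.map_cons]
    have hmap : (t.map (fun segment =>
        PySem.List.pyRepeat ['O'] ((PySem.Chars.count segment ['O'] : Nat) : Int) ++
        PySem.List.pyRepeat ['.'] ((segment.length : Int) - ((PySem.Chars.count segment ['O'] : Nat) : Int))))
        = t.map emitSeg := List.map_congr_left (fun seg _ => emitA_eq seg)
    rw [emitA_eq h, List.nil_append, hmap, join_emit t (emitSeg h)]
    rw [sweep_eq cs 0 0 h t hs]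
    simp [emitSeg]

-- ===== VERDICT (by name: the statement is the Claim_ definition above) =====
theorem tilt_to_west_spec : Claim_equal_tilt_to_west := by
  intro grid _
  unfold Spec_tilt_to_west tilt_to_west tilt_to_west_alt
  rw [PySem.List.foldl_append_singleton_eq_map, PySem.List.foldl_append_singleton_eq_map]
  exact List.map_congr_left (fun line _ => congrArg String.ofList (line_eq line.toList))
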